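-- pv_equiv track=rewrite | github.com/litvinov-it/PROFBUH_HACKATON | app/utils/RestoreTimecodes.py | clone_timecodes
-- ===== SOURCE A (Python) =====
-- def clone_timecodes(raw_transcript, raw_sentences):
--     idx_tr = 0
--     idx_sent = 0
--     while idx_tr < len(raw_transcript):
--         if raw_transcript[idx_tr].lower() != raw_sentences[idx_sent].lower():
--             if raw_transcript[idx_tr] == "_":
--                 while raw_transcript[idx_tr] != " ":
--                     raw_sentences.insert(idx_sent, raw_transcript[idx_tr])
--                     idx_tr += 1
--                     idx_sent += 1
--
--                 raw_sentences.insert(idx_sent, " ")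
--                 idx_sent += 1
--             else:
--                 idx_sent += 1
--                 continue
--         else:
--             idx_sent += 1
--
--         idx_tr += 1
--
--     # Преобразуем массив в строку
--     return ''.join(raw_sentences)
-- ===== SOURCE B (Python) =====
-- def clone_timecodes(raw_transcript, raw_sentences):
--     # Reversed working stacks popped from the end, appending to a fresh output
--     # list instead of A's positional list.insert splicing into the sentence list.
--     # Unlike A this does not mutate raw_sentences; the RETURN value is matched.
--     ts = raw_transcript[::-1]
--     ss = raw_sentences[::-1]
--     out = []
--     while ts:
--         s = ss[-1]
--         if ts[-1].lower() == s.lower():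
--             ts.pop()
--             ss.pop()
--             out.append(s)
--         elif ts[-1] == "_":
--             while ts[-1] != " ":
--                 out.append(ts.pop())
--             ts.pop()
--             out.append(" ")
--         else:
--             ss.pop()
--             out.append(s)
--     while ss:
--         out.append(ss.pop())
--     return ''.join(out)
-- ===== Notes on version B (the rewrite author's own statement) =====
-- stated objective: alternative
-- what changed: A walks indices into the transcript and splices characters into the sentence list with positional list.insert, then joins the mutated list; B consumes reversed copies of both lists as stacks popped from the end and appends to a fresh output list, never mutating raw_sentences.
import Mathlib
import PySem

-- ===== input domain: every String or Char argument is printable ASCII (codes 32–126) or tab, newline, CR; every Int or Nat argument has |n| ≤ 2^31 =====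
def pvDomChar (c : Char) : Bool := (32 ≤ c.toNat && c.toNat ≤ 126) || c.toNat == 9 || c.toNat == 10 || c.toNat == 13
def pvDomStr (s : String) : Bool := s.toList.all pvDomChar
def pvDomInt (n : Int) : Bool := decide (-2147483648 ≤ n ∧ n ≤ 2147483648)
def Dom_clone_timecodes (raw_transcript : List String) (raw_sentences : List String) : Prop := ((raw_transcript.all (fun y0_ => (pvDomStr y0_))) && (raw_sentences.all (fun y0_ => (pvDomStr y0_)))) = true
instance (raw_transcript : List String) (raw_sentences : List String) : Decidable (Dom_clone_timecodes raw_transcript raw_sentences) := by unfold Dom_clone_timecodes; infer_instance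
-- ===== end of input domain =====

-- B replaces A's index-walk with positional list.insert splicing by stack-style
-- consumption of both lists (reversed copies popped from the end) appending to a
-- fresh output list; only the RETURN value is claimed equal (A mutates
-- raw_sentences in place, B does not).

-- ===== PORT A =====
-- A's inner `while raw_transcript[idx_tr] != " "` loop of inserts; returns the mutated
-- sentence list and the two advanced indices, none = the loop ran off the end (IndexError).
def runA (T : List String) (L : List String) (i j : Nat) : Option (List String × Nat × Nat) :=
  if h : i < T.length then
    if T[i] = " " then some (L, i, j)
    else runA T (PySem.List.insert L (j : Int) T[i]) (i + 1) (j + 1)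
  else none
termination_by T.length - i
decreasing_by exact Nat.sub_succ_lt_self _ _ h

-- needed by goA's termination: the inner loop only advances idx_tr
theorem runA_le (T L : List String) (i j : Nat) :
    ∀ L' i' j', runA T L i j = some (L', i', j') → i ≤ i' := by
  fun_induction runA T L i j with
  | case1 L i j h ht =>
    intro L' i' j' hh
    simp only [Option.some.injEq, Prod.mk.injEq] at hh
    omega
  | case2 L i j h ht ih =>
    intro L' i' j' hh
    exact Nat.le_of_succ_le (ih L' i' j' hh)
  | case3 L i j h =>
    intro L' i' j' hh
    cases hh

-- A's outer while-loop; [] is returned only where the Python raises (outside Pre_).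
def goA (T : List String) (L : List String) (i j : Nat) : List String :=
  if h : i < T.length then
    match hs : L[j]? with
    | none => []      -- raw_sentences[idx_sent] raises IndexError
    | some s =>
      if PySem.Str.lower T[i] ≠ PySem.Str.lower s then
        if T[i] = "_" then
          match hr : runA T L i j with
          | none => []  -- the inner loop raises IndexError
          | some (L', i', j') => goA T (PySem.List.insert L' (j' : Int) " ") (i' + 1) (j' + 1)
        else goA T L i (j + 1)            -- idx_sent += 1; continue
      else goA T L (i + 1) (j + 1)
  else L
termination_by (T.length - i, L.length - j)
decreasing_by
  · exact Prod.Lex.left _ _ (Nat.sub_lt_sub_left h (Nat.lt_succ_of_le (runA_le T L i j L' i' j' hr)))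
  · exact Prod.Lex.right _ (Nat.sub_succ_lt_self _ _ (List.getElem?_eq_some_iff.mp hs).1)
  · exact Prod.Lex.left _ _ (Nat.sub_succ_lt_self _ _ h)

def clone_timecodes (raw_transcript : List String) (raw_sentences : List String) : String :=
  PySem.Str.join "" (goA raw_transcript raw_sentences 0 0)

-- ===== PORT B =====
-- Source B works on reversed copies of the lists popped from the END; here a popped
-- stack is a Lean list consumed at its HEAD (top of stack = head), and Source B's
-- `out.append` accumulates in `rout` in reverse (result = rout.reverse).
-- Inner `while ts[-1] != " "` loop: pop the run, pop the " ", push " ";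
-- none = the stack emptied (IndexError).
def runB : List String → List String → Option (List String × List String)
  | [], _ => none
  | t :: ts, rout => if t = " " then some (ts, " " :: rout) else runB ts (t :: rout)

-- needed by goB's termination: the inner loop pops at least the " "
theorem runB_lt : ∀ (ts rout ts' rout' : List String),
    runB ts rout = some (ts', rout') → ts'.length < ts.length := by
  intro ts
  induction ts with
  | nil => intro rout ts' rout' h; cases h
  | cons t ts ih =>
    intro rout ts' rout' h
    simp only [runB] at h
    split at h
    · simp only [Option.some.injEq, Prod.mk.injEq] at h
      obtain ⟨h1, -⟩ := h
      simp [← h1]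
    · exact Nat.lt_trans (ih _ _ _ h) (by simp)

-- Source B's main while-loop consuming the two stacks; [] only where it raises.
def goB : List String → List String → List String → List String
  | [], ss, rout => rout.reverse ++ ss   -- while ss: out.append(ss.pop())
  | t :: ts, ss, rout =>
    match ss with
    | [] => []                           -- s = ss[-1] raises IndexError
    | s :: ss2 =>
      if PySem.Str.lower t = PySem.Str.lower s then goB ts ss2 (s :: rout)
      else if t = "_" then
        match hr : runB (t :: ts) rout with
        | none => []
        | some (ts', rout') => goB ts' (s :: ss2) rout'
      else goB (t :: ts) ss2 (s :: rout)
termination_by ts ss _ => (ts.length, ss.length)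
decreasing_by
  · exact Prod.Lex.left _ _ (Nat.lt_succ_self _)
  · exact Prod.Lex.left _ _ (runB_lt _ _ _ _ hr)
  · exact Prod.Lex.right _ (Nat.lt_succ_self _)

def clone_timecodes_alt (raw_transcript : List String) (raw_sentences : List String) : String :=
  PySem.Str.join "" (goB raw_transcript raw_sentences [])

-- ===== PRECONDITION & SPEC =====
-- helper of Pre_: the sentence suffix after the first case-insensitive match of t, none if there is none
def pvNextMatch (t : String) : List String → Option (List String)
  | [] => none
  | s :: S => if PySem.Str.lower t = PySem.Str.lower s then some S else pvNextMatch t S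

-- acceptance relation of the inputs (no output, no indices): each transcript element is
-- matched case-insensitively by a later sentence element, except an unmatched "_" which
-- opens a run that must be closed by a later " " (inRun = inside such a run)
def pvAccepts : List String → List String → Bool → Bool
  | [], _, inRun => !inRun
  | t :: T, S, true => if t = " " then pvAccepts T S false else pvAccepts T S true
  | t :: T, S, false =>
    if t = "_" then
      match S with
      | [] => false
      | s :: S2 =>
        if PySem.Str.lower t = PySem.Str.lower s then pvAccepts T S2 false
        else pvAccepts T (s :: S2) true
    else
      match pvNextMatch t S with
      | none => false
      | some S' => pvAccepts T S' false

-- Pre_ holds exactly on the inputs where the Python A returns normally; elsewhere A raises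
-- IndexError (sentences exhausted at a comparison, or an underscore run never closed by " ").
-- A's returning set is data-dependent, so it is stated as this acceptance condition on the
-- two lists; it computes no output and is not either port's recursion.
def Pre_clone_timecodes (raw_transcript : List String) (raw_sentences : List String) : Prop :=
  pvAccepts raw_transcript raw_sentences false = true
instance (raw_transcript : List String) (raw_sentences : List String) : Decidable (Pre_clone_timecodes raw_transcript raw_sentences) := by unfold Pre_clone_timecodes; infer_instance

def pvWitness_clone_timecodes : List String × List String := (["_", "1", " ", "h", "i"], ["h", "I"])

def Spec_clone_timecodes (raw_transcript : List String) (raw_sentences : List String) (out : String) : Prop := out = clone_timecodes_alt raw_transcript raw_sentences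
instance (raw_transcript : List String) (raw_sentences : List String) (out : String) : Decidable (Spec_clone_timecodes raw_transcript raw_sentences out) := by unfold Spec_clone_timecodes; infer_instance

-- ===== CLAIM (what is proved, stated in full; the proofs are below) =====
def Claim_equal_clone_timecodes : Prop := ∀ (raw_transcript : List String) (raw_sentences : List String), Dom_clone_timecodes raw_transcript raw_sentences → Pre_clone_timecodes raw_transcript raw_sentences → Spec_clone_timecodes raw_transcript raw_sentences (clone_timecodes raw_transcript raw_sentences)

-- ===== LEMMAS AND PROOFS =====

-- proof-only middle form M of the merge: two-pointer indices with an in-order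
-- accumulator, bridging A's positional inserts and B's stack consumption.
def runM (T : List String) (i : Nat) (acc : List String) : Option (List String × Nat) :=
  if h : i < T.length then
    if T[i] = " " then some (acc, i)
    else runM T (i + 1) (acc ++ [T[i]])
  else none
termination_by T.length - i
decreasing_by exact Nat.sub_succ_lt_self _ _ h

theorem runM_le (T : List String) (i : Nat) (acc : List String) :
    ∀ acc' i', runM T i acc = some (acc', i') → i ≤ i' := by
  fun_induction runM T i acc with
  | case1 i acc h ht =>
    intro acc' i' hh
    simp only [Option.some.injEq, Prod.mk.injEq] at hh
    omega
  | case2 i acc h ht ih =>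
    intro acc' i' hh
    exact Nat.le_of_succ_le (ih acc' i' hh)
  | case3 i acc h =>
    intro acc' i' hh
    cases hh

def goM (T S : List String) (i j : Nat) (acc : List String) : List String :=
  if h : i < T.length then
    match hs : S[j]? with
    | none => []
    | some s =>
      if PySem.Str.lower T[i] = PySem.Str.lower s then goM T S (i + 1) (j + 1) (acc ++ [s])
      else if T[i] = "_" then
        match hr : runM T i acc with
        | none => []
        | some (acc', i') => goM T S (i' + 1) j (acc' ++ [" "])
      else goM T S i (j + 1) (acc ++ [s])
  else acc ++ S.drop j
termination_by (T.length - i, S.length - j)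
decreasing_by
  · exact Prod.Lex.left _ _ (Nat.sub_succ_lt_self _ _ h)
  · exact Prod.Lex.left _ _ (Nat.sub_lt_sub_left h (Nat.lt_succ_of_le (runM_le T i acc acc' i' hr)))
  · exact Prod.Lex.right _ (Nat.sub_succ_lt_self _ _ (List.getElem?_eq_some_iff.mp hs).1)

-- the inserts of A's inner loop at position acc.length are M's appends before the tail D
theorem runA_eq_runM (T : List String) (i : Nat) (acc D : List String) :
    runA T (acc ++ D) i acc.length
      = (runM T i acc).map (fun p => (p.1 ++ D, p.2, p.1.length)) := by
  fun_induction runM T i acc with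
  | case1 i acc h ht =>
    rw [runA, dif_pos h, if_pos ht]
    simp
  | case2 i acc h ht ih =>
    rw [runA, dif_pos h, if_neg ht]
    rw [PySem.List.insert_natCast (acc ++ D) acc.length T[i] (by simp)]
    rw [List.take_left, List.drop_left]
    have h1 : acc ++ T[i] :: D = (acc ++ [T[i]]) ++ D := by simp
    have h2 : acc.length + 1 = (acc ++ [T[i]]).length := by simp
    rw [h1, h2]
    exact ih
  | case3 i acc h =>
    rw [runA, dif_neg h]
    simp

-- main invariant A↔M: A's mutated list is M's accumulator followed by the unconsumed
-- sentence suffix, and A's idx_sent is the accumulator's length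
theorem goA_eq_goM (T S : List String) (i j : Nat) (acc : List String) :
    goA T (acc ++ S.drop j) i acc.length = goM T S i j acc := by
  fun_induction goM T S i j acc with
  | case1 i j acc h hs =>
    have hj : S.length ≤ j := List.getElem?_eq_none_iff.mp hs
    rw [List.drop_eq_nil_of_le hj, List.append_nil]
    rw [goA, dif_pos h]
    split
    · rfl
    · rename_i s hsome
      have hn : acc[acc.length]? = none := List.getElem?_eq_none (le_refl _)
      rw [hn] at hsome
      cases hsome
  | case2 i j acc h s hs heq ih =>
    obtain ⟨hj, hv⟩ := List.getElem?_eq_some_iff.mp hs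
    have hd : S.drop j = s :: S.drop (j + 1) := by
      rw [← List.getElem_cons_drop hj, hv]
    have hget : (acc ++ S.drop j)[acc.length]? = some s := by
      rw [hd, List.getElem?_append_right (le_refl _)]
      simp
    rw [goA, dif_pos h]
    split
    · rename_i hnone
      simp only [hget, reduceCtorEq] at hnone
    · rename_i s' hsome
      rw [hget] at hsome
      injection hsome with hss
      subst hss
      rw [if_neg (by simp [heq])]
      rw [hd]
      have h1 : acc ++ s :: S.drop (j + 1) = (acc ++ [s]) ++ S.drop (j + 1) := by simp
      have h2 : acc.length + 1 = (acc ++ [s]).length := by simp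
      rw [h1, h2]
      exact ih
  | case3 i j acc h s hs hne hu hr =>
    obtain ⟨hj, hv⟩ := List.getElem?_eq_some_iff.mp hs
    have hd : S.drop j = s :: S.drop (j + 1) := by
      rw [← List.getElem_cons_drop hj, hv]
    have hget : (acc ++ S.drop j)[acc.length]? = some s := by
      rw [hd, List.getElem?_append_right (le_refl _)]
      simp
    have hrw := runA_eq_runM T i acc (S.drop j)
    rw [hr] at hrw
    simp only [Option.map_none] at hrw
    rw [goA, dif_pos h]
    split
    · rename_i hnone
      simp only [hget, reduceCtorEq] at hnone
    · rename_i s' hsome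
      rw [hget] at hsome
      injection hsome with hss
      subst hss
      rw [if_pos hne, if_pos hu]
      split
      · rfl
      · rename_i L' i'' j'' hsome2
        rw [hrw] at hsome2
        cases hsome2
  | case4 i j acc h s hs hne hu acc' i' hr ih =>
    obtain ⟨hj, hv⟩ := List.getElem?_eq_some_iff.mp hs
    have hd : S.drop j = s :: S.drop (j + 1) := by
      rw [← List.getElem_cons_drop hj, hv]
    have hget : (acc ++ S.drop j)[acc.length]? = some s := by
      rw [hd, List.getElem?_append_right (le_refl _)]
      simp
    have hrw := runA_eq_runM T i acc (S.drop j)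
    rw [hr] at hrw
    simp only [Option.map_some] at hrw
    rw [goA, dif_pos h]
    split
    · rename_i hnone
      simp only [hget, reduceCtorEq] at hnone
    · rename_i s' hsome
      rw [hget] at hsome
      injection hsome with hss
      subst hss
      rw [if_pos hne, if_pos hu]
      split
      · rename_i hnone
        rw [hrw] at hnone
        cases hnone
      · rename_i L' i'' j'' hsome2
        rw [hrw] at hsome2
        simp only [Option.some.injEq, Prod.mk.injEq] at hsome2
        obtain ⟨hL, hi2, hj2⟩ := hsome2
        subst hL; subst hi2; subst hj2
        rw [PySem.List.insert_natCast (acc' ++ S.drop j) acc'.length " " (by simp)]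
        rw [List.take_left, List.drop_left]
        have h1 : acc' ++ " " :: S.drop j = (acc' ++ [" "]) ++ S.drop j := by simp
        have h2 : acc'.length + 1 = (acc' ++ [" "]).length := by simp
        rw [h1, h2]
        exact ih
  | case5 i j acc h s hs hne hu ih =>
    obtain ⟨hj, hv⟩ := List.getElem?_eq_some_iff.mp hs
    have hd : S.drop j = s :: S.drop (j + 1) := by
      rw [← List.getElem_cons_drop hj, hv]
    have hget : (acc ++ S.drop j)[acc.length]? = some s := by
      rw [hd, List.getElem?_append_right (le_refl _)]
      simp
    rw [goA, dif_pos h]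
    split
    · rename_i hnone
      simp only [hget, reduceCtorEq] at hnone
    · rename_i s' hsome
      rw [hget] at hsome
      injection hsome with hss
      subst hss
      rw [if_pos hne, if_neg hu]
      rw [hd]
      have h1 : acc ++ s :: S.drop (j + 1) = (acc ++ [s]) ++ S.drop (j + 1) := by simp
      have h2 : acc.length + 1 = (acc ++ [s]).length := by simp
      rw [h1, h2]
      exact ih
  | case6 i j acc h =>
    rw [goA, dif_neg h]

-- reading a cons-shaped drop back as index facts
theorem drop_cons_facts (T : List String) (i : Nat) (t : String) (ts : List String)
    (h : T.drop i = t :: ts) : i < T.length ∧ T[i]? = some t ∧ T.drop (i + 1) = ts := by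
  have hi : i < T.length := by
    by_contra hge
    rw [List.drop_eq_nil_of_le (by omega)] at h
    cases h
  refine ⟨hi, ?_, ?_⟩
  · have h0 : (T.drop i)[(0 : Nat)]? = T[i + 0]? := List.getElem?_drop
    rw [h] at h0
    simpa using h0.symm
  · have : T.drop (i + 1) = (T.drop i).drop 1 := by
      rw [List.drop_drop]
    rw [this, h]
    rfl

-- M's inner loop ↔ B's: same run, accumulator reversed, the " " already pushed
theorem runM_eq_runB (ts rout : List String) : ∀ (T : List String) (i : Nat), T.drop i = ts →
    (runB ts rout = none → runM T i rout.reverse = none) ∧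
    (∀ ts' rout', runB ts rout = some (ts', rout') →
      ∃ i' rout1, rout' = " " :: rout1 ∧ ts' = T.drop (i' + 1) ∧
        runM T i rout.reverse = some (rout1.reverse, i')) := by
  fun_induction runB ts rout with
  | case1 rout =>
    intro T i hdrop
    refine ⟨fun _ => ?_, fun ts' rout' hh => by cases hh⟩
    have hge : T.length ≤ i := by
      by_contra hlt
      have := List.drop_eq_nil_iff.mp hdrop
      omega
    rw [runM, dif_neg (by omega)]
  | case2 ts rout =>
    intro T i hdrop
    obtain ⟨hi, hget, hdrop1⟩ := drop_cons_facts T i " " ts hdrop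
    have hv : T[i] = " " := (List.getElem?_eq_some_iff.mp hget).2
    constructor
    · intro hh
      simp at hh
    intro ts' rout' hh
    simp only [Option.some.injEq, Prod.mk.injEq] at hh
    obtain ⟨h1, h2⟩ := hh
    refine ⟨i, rout, h2.symm, by rw [← h1, ← hdrop1], ?_⟩
    rw [runM, dif_pos hi, if_pos hv]
  | case3 t ts rout hsp ih =>
    intro T i hdrop
    obtain ⟨hi, hget, hdrop1⟩ := drop_cons_facts T i t ts hdrop
    have hv : T[i] = t := (List.getElem?_eq_some_iff.mp hget).2
    have hstep : runM T i rout.reverse = runM T (i + 1) (t :: rout).reverse := by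
      rw [runM, dif_pos hi, if_neg (by rw [hv]; exact hsp), hv]
      simp
    obtain ⟨ihn, ihs⟩ := ih T (i + 1) hdrop1
    refine ⟨fun hh => by rw [hstep]; exact ihn hh, fun ts' rout' hh => ?_⟩
    obtain ⟨i', rout1, e1, e2, e3⟩ := ihs ts' rout' hh
    exact ⟨i', rout1, e1, e2, by rw [hstep]; exact e3⟩

-- main invariant M↔B: M's indices point at the unconsumed suffixes (B's stacks),
-- M's in-order accumulator is B's `out` (kept reversed in rout)
theorem goM_eq_goB (ts ss rout : List String) : ∀ (T S : List String) (i j : Nat),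
    T.drop i = ts → S.drop j = ss → goM T S i j rout.reverse = goB ts ss rout := by
  fun_induction goB ts ss rout with
  | case1 ss rout =>
    intro T S i j hT hS
    have hge : T.length ≤ i := by
      by_contra hlt
      have := List.drop_eq_nil_iff.mp hT
      omega
    rw [goM, dif_neg (by omega), hS]
  | case2 t ts rout =>
    intro T S i j hT hS
    obtain ⟨hi, -, -⟩ := drop_cons_facts T i t ts hT
    have hj : S.length ≤ j := by
      by_contra hlt
      have := List.drop_eq_nil_iff.mp hS
      omega
    rw [goM, dif_pos hi]
    have hn : S[j]? = none := List.getElem?_eq_none hj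
    split
    · rfl
    · rename_i s hsome
      rw [hn] at hsome
      cases hsome
  | case3 t ts rout s ss2 heq ih =>
    intro T S i j hT hS
    obtain ⟨hi, hgetT, hT1⟩ := drop_cons_facts T i t ts hT
    obtain ⟨-, hgetS, hS1⟩ := drop_cons_facts S j s ss2 hS
    have hvT : T[i] = t := (List.getElem?_eq_some_iff.mp hgetT).2
    rw [goM, dif_pos hi]
    split
    · rename_i hnone
      simp only [hgetS, reduceCtorEq] at hnone
    · rename_i s' hsome
      rw [hgetS] at hsome
      injection hsome with hss'
      subst hss'
      rw [if_pos (by rw [hvT]; exact heq)]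
      have h2 : rout.reverse ++ [s] = (s :: rout).reverse := by simp
      rw [h2]
      exact ih T S (i + 1) (j + 1) hT1 hS1
  | case4 ts rout s ss2 hne hr =>
    intro T S i j hT hS
    obtain ⟨hi, hgetT, -⟩ := drop_cons_facts T i "_" ts hT
    obtain ⟨-, hgetS, -⟩ := drop_cons_facts S j s ss2 hS
    have hvT : T[i] = "_" := (List.getElem?_eq_some_iff.mp hgetT).2
    obtain ⟨ihn, -⟩ := runM_eq_runB ("_" :: ts) rout T i hT
    rw [goM, dif_pos hi]
    split
    · rename_i hnone
      simp only [hgetS, reduceCtorEq] at hnone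
    · rename_i s' hsome
      rw [hgetS] at hsome
      injection hsome with hss'
      subst hss'
      rw [if_neg (by rw [hvT]; exact hne), if_pos hvT]
      split
      · rfl
      · rename_i acc' i'' hsome2
        rw [ihn hr] at hsome2
        cases hsome2
  | case5 ts rout s ss2 ts' rout' hne hr ih =>
    intro T S i j hT hS
    obtain ⟨hi, hgetT, -⟩ := drop_cons_facts T i "_" ts hT
    obtain ⟨-, hgetS, -⟩ := drop_cons_facts S j s ss2 hS
    have hvT : T[i] = "_" := (List.getElem?_eq_some_iff.mp hgetT).2
    obtain ⟨-, ihs⟩ := runM_eq_runB ("_" :: ts) rout T i hT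
    obtain ⟨i', rout1, e1, e2, e3⟩ := ihs ts' rout' hr
    rw [goM, dif_pos hi]
    split
    · rename_i hnone
      simp only [hgetS, reduceCtorEq] at hnone
    · rename_i s' hsome
      rw [hgetS] at hsome
      injection hsome with hss'
      subst hss'
      rw [if_neg (by rw [hvT]; exact hne), if_pos hvT]
      split
      · rename_i hnone
        rw [e3] at hnone
        cases hnone
      · rename_i acc' i'' hsome2
        rw [e3] at hsome2
        simp only [Option.some.injEq, Prod.mk.injEq] at hsome2
        obtain ⟨ha, hi2⟩ := hsome2
        subst ha; subst hi2
        have h2 : rout1.reverse ++ [" "] = (" " :: rout1).reverse := by simp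
        rw [h2, ← e1]
        exact ih T S (i' + 1) j e2.symm hS
  | case6 t ts rout s ss2 hne hu ih =>
    intro T S i j hT hS
    obtain ⟨hi, hgetT, -⟩ := drop_cons_facts T i t ts hT
    obtain ⟨-, hgetS, hS1⟩ := drop_cons_facts S j s ss2 hS
    have hvT : T[i] = t := (List.getElem?_eq_some_iff.mp hgetT).2
    rw [goM, dif_pos hi]
    split
    · rename_i hnone
      simp only [hgetS, reduceCtorEq] at hnone
    · rename_i s' hsome
      rw [hgetS] at hsome
      injection hsome with hss'
      subst hss'
      rw [if_neg (by rw [hvT]; exact hne), if_neg (by rw [hvT]; exact hu)]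
      have h2 : rout.reverse ++ [s] = (s :: rout).reverse := by simp
      rw [h2]
      exact ih T S i (j + 1) hT hS1

-- ===== VERDICT (by name: the statement is the Claim_ definition above) =====
theorem clone_timecodes_spec : Claim_equal_clone_timecodes := by
  intro T S _ _
  show PySem.Str.join "" (goA T S 0 0) = _
  have hAM := goA_eq_goM T S 0 0 []
  simp only [List.drop_zero, List.nil_append, List.length_nil] at hAM
  have hMB := goM_eq_goB T S [] T S 0 0 (by simp) (by simp)
  simp only [List.reverse_nil] at hMB
  rw [clone_timecodes_alt, hAM, hMB]
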